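-- pv_equiv track=rewrite | github.com/asweigart/programmedpatterns | book/visualpatterns.py | formula37
-- ===== SOURCE A (Python) =====
-- def formula37(step):
--     count = 1
--     i = 2
--     while True:
--         if i > step:
--             break
--         count += 2
--         i += 1
--
--         if i > step:
--             break
--         count += 0
--         i += 1
--
--         if i > step:
--             break
--         count += 0
--         i += 1
--     return count
-- ===== SOURCE B (Python) =====
-- def formula37(step):
--     if step < 2:
--         return 1
--     return 1 + 2 * ((step - 2) // 3 + 1)
-- ===== Notes on version B (the rewrite author's own statement) =====
-- stated objective: faster
-- what changed: Replaces the linear three-phase counting loop by a constant-time closed-form floor-division formula.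
import Mathlib
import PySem

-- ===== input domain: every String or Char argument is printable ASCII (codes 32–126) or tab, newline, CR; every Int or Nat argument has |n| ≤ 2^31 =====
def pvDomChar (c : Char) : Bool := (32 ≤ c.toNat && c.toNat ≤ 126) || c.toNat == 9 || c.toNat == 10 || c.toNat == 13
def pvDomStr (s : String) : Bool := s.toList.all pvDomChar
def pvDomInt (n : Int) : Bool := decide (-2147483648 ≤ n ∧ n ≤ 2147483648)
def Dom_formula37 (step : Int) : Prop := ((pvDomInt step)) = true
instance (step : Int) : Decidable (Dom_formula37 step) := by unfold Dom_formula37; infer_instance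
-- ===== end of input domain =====

-- B replaces A's 3-phase counting loop by an O(1) closed form; objective: faster.

-- ===== PORT A =====
-- A's 'while True' loop with three break points, as a recursion on state (count, i);
-- it terminates because i strictly increases while i ≤ step.
def formula37Loop (step count i : Int) : Int :=
  if i > step then count
  else
    -- count += 2; i += 1
    let count := count + 2
    let i := i + 1
    if i > step then count
    else
      -- count += 0; i += 1
      let i := i + 1
      if i > step then count
      else
        -- count += 0; i += 1, back to loop top
        formula37Loop step count (i + 1)
termination_by (step - i).toNat
decreasing_by omega

def formula37 (step : Int) : Int := formula37Loop step 1 2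

-- ===== PORT B =====
def formula37_alt (step : Int) : Int :=
  if step < 2 then 1
  else 1 + 2 * (PySem.Int.floordiv (step - 2) 3 + 1)

-- ===== PRECONDITION & SPEC =====
def Spec_formula37 (step : Int) (out : Int) : Prop := out = formula37_alt step
instance (step : Int) (out : Int) : Decidable (Spec_formula37 step out) := by unfold Spec_formula37; infer_instance

-- ===== CLAIM (what is proved, stated in full; the proofs are below) =====
def Claim_equal_formula37 : Prop := ∀ (step : Int), Dom_formula37 step → Spec_formula37 step (formula37 step)

-- ===== LEMMAS AND PROOFS =====

-- Loop characterisation: from any state, the loop adds 2 for every residue-matching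
-- index left in [i, step], i.e. 2 * ((step - i) / 3 + 1) when i ≤ step.
theorem formula37Loop_eq (n : Nat) (step count i : Int) (h : (step - i).toNat = n) :
    formula37Loop step count i =
      count + (if i > step then 0 else 2 * ((step - i) / 3 + 1)) := by
  induction n using Nat.strong_induction_on generalizing count i with
  | _ n ih =>
    rw [formula37Loop]
    by_cases h1 : i > step
    · simp [h1]
    · simp only [h1]
      by_cases h2 : i + 1 > step
      · simp only [h2, if_pos]
        have : step - i = 0 := by omega
        simp [this]
      · simp only [h2, if_neg, not_false_iff]
        by_cases h3 : i + 1 + 1 > step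
        · simp only [h3, if_pos]
          have : step - i = 1 := by omega
          simp [this]
        · simp only [h3, if_neg, not_false_iff]
          rw [ih (step - (i + 1 + 1 + 1)).toNat (by omega) (count + 2) (i + 1 + 1 + 1) rfl]
          by_cases h4 : i + 1 + 1 + 1 > step
          · have : step - i = 2 := by omega
            simp [h4, this]
          · simp only [h4, if_neg, not_false_iff]
            have h5 : step - (i + 1 + 1 + 1) = (step - i) + (-1) * 3 := by ring
            rw [h5, Int.add_mul_ediv_right _ _ (by norm_num : (3 : Int) ≠ 0)]
            ring

theorem fdiv_eq_ediv_of_pos (a b : Int) (hb : 0 < b) : Int.fdiv a b = a / b := by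
  rw [Int.fdiv_eq_ediv]
  simp [hb.le]

-- ===== VERDICT (by name: the statement is the Claim_ definition above) =====
theorem formula37_spec : Claim_equal_formula37 := by
  intro step _
  unfold Spec_formula37 formula37 formula37_alt
  rw [formula37Loop_eq (step - 2).toNat step 1 2 rfl]
  by_cases h : step < 2
  · simp [h]
  · have h2 : ¬ ((2 : Int) > step) := by omega
    rw [if_neg h2, if_neg h]
    unfold PySem.Int.floordiv
    rw [fdiv_eq_ediv_of_pos _ _ (by norm_num)]
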